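-- pv_equiv track=rewrite | github.com/Arun-kvr/practice-codes | 09.unionofsortedarrays.py | union_of_sorted_arrays
-- ===== SOURCE A (Python) =====
-- def union_of_sorted_arrays(arr1,arr2):
--     target=[]
--     for num in arr1:
--         if num not in target:
--             target.append(num)
--     for num in arr2:
--         if num not in target:
--             target.append(num)
--     return sorted(target)
-- ===== SOURCE B (Python) =====
-- def union_of_sorted_arrays(arr1, arr2):
--     merged = sorted(arr1 + arr2)
--     result = []
--     for x in merged:
--         if not result or x != result[-1]:
--             result.append(x)
--     return result
-- ===== Notes on version B (the rewrite author's own statement) =====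
-- stated objective: faster
-- what changed: Replaces A's quadratic grow-and-membership-check dedup followed by a final sort with sort-first then a single linear adjacent-duplicate-skipping pass.
import Mathlib
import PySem

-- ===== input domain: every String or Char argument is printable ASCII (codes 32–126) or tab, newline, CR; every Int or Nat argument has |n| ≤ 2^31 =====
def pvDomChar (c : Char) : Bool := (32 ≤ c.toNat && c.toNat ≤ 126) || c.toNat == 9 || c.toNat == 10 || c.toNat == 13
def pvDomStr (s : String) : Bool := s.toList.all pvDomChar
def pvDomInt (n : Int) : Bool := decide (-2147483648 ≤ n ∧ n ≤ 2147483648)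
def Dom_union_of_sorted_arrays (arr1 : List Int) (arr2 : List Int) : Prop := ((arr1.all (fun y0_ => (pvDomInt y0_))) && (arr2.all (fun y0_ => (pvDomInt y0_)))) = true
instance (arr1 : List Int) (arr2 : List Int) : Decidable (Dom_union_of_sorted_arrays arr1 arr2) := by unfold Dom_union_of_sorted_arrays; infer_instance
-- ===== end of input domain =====

-- B replaces A's quadratic grow-and-membership-check dedup + final sort by sort-first then one
-- linear adjacent-duplicate-skipping pass (objective: faster).

-- ===== PORT A =====
-- 'if num not in target: target.append(num)'
def pvAddDistinct (t : List Int) (num : Int) : List Int := if num ∈ t then t else t ++ [num]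

def union_of_sorted_arrays (arr1 : List Int) (arr2 : List Int) : List Int :=
  let target : List Int := []
  let target := arr1.foldl pvAddDistinct target
  let target := arr2.foldl pvAddDistinct target
  PySem.List.sorted target (fun x => x) false

-- ===== PORT B =====
-- 'if not result or x != result[-1]: result.append(x)'
def pvStep (res : List Int) (x : Int) : List Int :=
  match res.getLast? with
  | none => res ++ [x]
  | some l => if x ≠ l then res ++ [x] else res

def union_of_sorted_arrays_alt (arr1 : List Int) (arr2 : List Int) : List Int :=
  let merged := PySem.List.sorted (arr1 ++ arr2) (fun x => x) false
  merged.foldl pvStep []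

-- ===== PRECONDITION & SPEC =====
def Spec_union_of_sorted_arrays (arr1 : List Int) (arr2 : List Int) (out : List Int) : Prop := out = union_of_sorted_arrays_alt arr1 arr2
instance (arr1 : List Int) (arr2 : List Int) (out : List Int) : Decidable (Spec_union_of_sorted_arrays arr1 arr2 out) := by unfold Spec_union_of_sorted_arrays; infer_instance

-- ===== CLAIM (what is proved, stated in full; the proofs are below) =====
def Claim_equal_union_of_sorted_arrays : Prop := ∀ (arr1 : List Int) (arr2 : List Int), Dom_union_of_sorted_arrays arr1 arr2 → Spec_union_of_sorted_arrays arr1 arr2 (union_of_sorted_arrays arr1 arr2)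

-- ===== LEMMAS AND PROOFS =====

-- A's accumulator: keeps Nodup and collects exactly acc ∪ xs.
theorem foldl_addDistinct_spec (xs : List Int) : ∀ acc : List Int, acc.Nodup →
    (xs.foldl pvAddDistinct acc).Nodup ∧
    (∀ y, y ∈ xs.foldl pvAddDistinct acc ↔ y ∈ acc ∨ y ∈ xs) := by
  induction xs with
  | nil => intro acc h; exact ⟨h, by simp⟩
  | cons x t ih =>
    intro acc h
    simp only [List.foldl_cons]
    by_cases hx : x ∈ acc
    · have hstep : pvAddDistinct acc x = acc := by simp [pvAddDistinct, hx]
      rw [hstep]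
      obtain ⟨hn, hm⟩ := ih acc h
      refine ⟨hn, fun y => ?_⟩
      rw [hm]
      constructor
      · rintro (hy | hy)
        · exact Or.inl hy
        · exact Or.inr (List.mem_cons_of_mem _ hy)
      · rintro (hy | hy)
        · exact Or.inl hy
        · rcases List.mem_cons.mp hy with rfl | hy
          · exact Or.inl hx
          · exact Or.inr hy
    · have hstep : pvAddDistinct acc x = acc ++ [x] := by simp [pvAddDistinct, hx]
      rw [hstep]
      have hn' : (acc ++ [x]).Nodup := by
        simp [List.nodup_append, h]
        intro a ha hax
        exact hx (hax ▸ ha)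
      obtain ⟨hn, hm⟩ := ih (acc ++ [x]) hn'
      refine ⟨hn, fun y => ?_⟩
      rw [hm]
      simp [List.mem_append, or_assoc]

theorem le_of_mem_of_getLast? (acc : List Int) (l : Int)
    (hp : acc.Pairwise (· < ·)) (hl : acc.getLast? = some l) :
    ∀ a ∈ acc, a ≤ l := by
  obtain ⟨acc', rfl⟩ := List.getLast?_eq_some_iff.mp hl
  intro a ha
  rcases List.mem_append.mp ha with ha | ha
  · have := (List.pairwise_append.mp hp).2.2 a ha l (by simp)
    exact le_of_lt this
  · simp at ha; omega

-- B's accumulator over a ≤-sorted stream: strictly increasing, collects acc ∪ s.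
theorem foldl_pvStep_spec (s : List Int) : ∀ acc : List Int,
    s.Pairwise (· ≤ ·) → acc.Pairwise (· < ·) → (∀ a ∈ acc, ∀ b ∈ s, a ≤ b) →
    (s.foldl pvStep acc).Pairwise (· < ·) ∧
    (∀ y, y ∈ s.foldl pvStep acc ↔ y ∈ acc ∨ y ∈ s) := by
  induction s with
  | nil => intro acc _ hacc _; exact ⟨hacc, by simp⟩
  | cons x t ih =>
    intro acc hs hacc hcross
    have hs' : t.Pairwise (· ≤ ·) := (List.pairwise_cons.mp hs).2
    have hxle : ∀ b ∈ t, x ≤ b := (List.pairwise_cons.mp hs).1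
    simp only [List.foldl_cons]
    rcases hgl : acc.getLast? with _ | l
    · -- acc is empty
      have hacc0 : acc = [] := List.getLast?_eq_none_iff.mp hgl
      subst hacc0
      have hstep : pvStep [] x = [x] := by simp [pvStep]
      rw [hstep]
      obtain ⟨hn, hm⟩ := ih [x] hs' (by simp) (by intro a ha b hb; simp at ha; subst ha; exact hxle b hb)
      refine ⟨hn, fun y => ?_⟩
      rw [hm]; simp
    · have hlmem : l ∈ acc := by
        obtain ⟨acc', rfl⟩ := List.getLast?_eq_some_iff.mp hgl
        simp
      by_cases hxl : x = l
      · -- skip: x already the last element of acc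
        have hstep : pvStep acc x = acc := by simp [pvStep, hgl, hxl]
        rw [hstep]
        obtain ⟨hn, hm⟩ := ih acc hs' hacc
          (fun a ha b hb => hcross a ha b (List.mem_cons_of_mem _ hb))
        refine ⟨hn, fun y => ?_⟩
        rw [hm]
        constructor
        · rintro (hy | hy)
          · exact Or.inl hy
          · exact Or.inr (List.mem_cons_of_mem _ hy)
        · rintro (hy | hy)
          · exact Or.inl hy
          · rcases List.mem_cons.mp hy with rfl | hy
            · exact Or.inl (hxl ▸ hlmem)
            · exact Or.inr hy
      · -- append x
        have hstep : pvStep acc x = acc ++ [x] := by simp [pvStep, hgl, hxl]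
        rw [hstep]
        have hlltx : l < x := lt_of_le_of_ne (hcross l hlmem x (by simp)) (Ne.symm hxl)
        have hltx : ∀ a ∈ acc, a < x := fun a ha =>
          lt_of_le_of_lt (le_of_mem_of_getLast? acc l hacc hgl a ha) hlltx
        have hacc' : (acc ++ [x]).Pairwise (· < ·) := by
          rw [List.pairwise_append]
          exact ⟨hacc, by simp, fun a ha b hb => by simp at hb; subst hb; exact hltx a ha⟩
        have hcross' : ∀ a ∈ acc ++ [x], ∀ b ∈ t, a ≤ b := by
          intro a ha b hb
          rcases List.mem_append.mp ha with ha | ha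
          · exact hcross a ha b (List.mem_cons_of_mem _ hb)
          · simp at ha; subst ha; exact hxle b hb
        obtain ⟨hn, hm⟩ := ih (acc ++ [x]) hs' hacc' hcross'
        refine ⟨hn, fun y => ?_⟩
        rw [hm]
        simp [List.mem_append, or_assoc]

-- ===== VERDICT (by name: the statement is the Claim_ definition above) =====
theorem union_of_sorted_arrays_spec : Claim_equal_union_of_sorted_arrays := by
  unfold Claim_equal_union_of_sorted_arrays Spec_union_of_sorted_arrays
  intro arr1 arr2 _
  unfold union_of_sorted_arrays union_of_sorted_arrays_alt
  simp only []
  set m := PySem.List.sorted (arr1 ++ arr2) (fun x => x) false with hm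
  have hmle : m.Pairwise (· ≤ ·) := by
    simpa using PySem.List.sorted_pairwise (xs := arr1 ++ arr2) (key := fun x => x)
  obtain ⟨hys_pw, hys_mem⟩ := foldl_pvStep_spec m [] hmle (by simp) (by simp)
  obtain ⟨h1n, h1m⟩ := foldl_addDistinct_spec arr1 [] (by simp)
  obtain ⟨h2n, h2m⟩ := foldl_addDistinct_spec arr2 _ h1n
  have hysn : (m.foldl pvStep []).Nodup := hys_pw.imp (fun h => ne_of_lt h)
  have hperm : (m.foldl pvStep []).Perm (arr2.foldl pvAddDistinct (arr1.foldl pvAddDistinct [])) := by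
    rw [List.perm_ext_iff_of_nodup hysn h2n]
    intro y
    rw [hys_mem, h2m, h1m, hm]
    simp [PySem.List.mem_sorted]
  apply PySem.List.sorted_eq_of_perm_of_pairwise_lt
  · exact hperm
  · simpa using hys_pw
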